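-- pv_equiv track=rewrite | github.com/Blopez750/pyRadar | radar_utils/hardware_setup.py | build_rx_channel_config
-- ===== SOURCE A (Python) =====
-- SUBARRAY_TO_ADC = {1: 3, 2: 1, 3: 0, 4: 2}
--
-- def build_rx_channel_config(subarray_modes):
--     """Derive which ADC channels to enable and the subarray → data-index mapping.
--
--     When only RX subarrays are enabled on the ADC, adc.rx() returns fewer
--     arrays and the indices shift.  For example if subarrays 1,2,4 are RX and
--     subarray 3 is TX, the ADC only returns 3 arrays instead of 4.  This
--     function figures out which position in that shortened list corresponds
--     to which subarray so callers can do ``data[subarray_to_data_index[sa]]``.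
--
--     Parameters:
--         subarray_modes: dict  {1: "rx", 2: "rx", 3: "tx", 4: "rx"}
--
--     Returns:
--         rx_enabled_channels:    sorted list of ADC channel indices to enable
--         subarray_to_data_index: dict {subarray_id: index_in_adc_rx_output}
--                                 (only contains RX subarrays)
--     """
--     rx_adc_channels = sorted(
--         SUBARRAY_TO_ADC[sa]
--         for sa, mode in subarray_modes.items()
--         if isinstance(mode, str) and mode.lower() == "rx"
--     )
--     adc_to_position = {ch: idx for idx, ch in enumerate(rx_adc_channels)}
--     subarray_to_data_index = {
--         sa: adc_to_position[SUBARRAY_TO_ADC[sa]]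
--         for sa, mode in subarray_modes.items()
--         if isinstance(mode, str) and mode.lower() == "rx"
--     }
--     return rx_adc_channels, subarray_to_data_index
-- ===== SOURCE B (Python) =====
-- SUBARRAY_TO_ADC = {1: 3, 2: 1, 3: 0, 4: 2}
-- ADC_TO_SUBARRAY = {ch: sa for sa, ch in SUBARRAY_TO_ADC.items()}
--
--
-- def build_rx_channel_config(subarray_modes):
--     # No sorting and no channel->position table: walk the fixed ADC channels in
--     # increasing order via the inverse map, keeping each channel whose subarray is
--     # RX; a subarray's data index is then just its channel's position in that list.
--     def is_rx(mode):
--         return isinstance(mode, str) and mode.lower() == "rx"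
--
--     rx_adc_channels = [ch for ch in range(4)
--                        if is_rx(subarray_modes.get(ADC_TO_SUBARRAY[ch]))]
--     subarray_to_data_index = {
--         sa: rx_adc_channels.index(SUBARRAY_TO_ADC[sa])
--         for sa, mode in subarray_modes.items() if is_rx(mode)}
--     return rx_adc_channels, subarray_to_data_index
-- ===== Notes on version B (the rewrite author's own statement) =====
-- stated objective: alternative
-- what changed: B replaces A's sort plus enumerate-built channel->position table by a single membership-driven walk over the four fixed ADC channels in increasing order (via the inverse map ADC_TO_SUBARRAY), reading each data index off as the channel's position in that list.
-- outside the precondition, e.g. on build_rx_channel_config({5: 'rx'}): A raises KeyError, B raises KeyError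
import Mathlib
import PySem

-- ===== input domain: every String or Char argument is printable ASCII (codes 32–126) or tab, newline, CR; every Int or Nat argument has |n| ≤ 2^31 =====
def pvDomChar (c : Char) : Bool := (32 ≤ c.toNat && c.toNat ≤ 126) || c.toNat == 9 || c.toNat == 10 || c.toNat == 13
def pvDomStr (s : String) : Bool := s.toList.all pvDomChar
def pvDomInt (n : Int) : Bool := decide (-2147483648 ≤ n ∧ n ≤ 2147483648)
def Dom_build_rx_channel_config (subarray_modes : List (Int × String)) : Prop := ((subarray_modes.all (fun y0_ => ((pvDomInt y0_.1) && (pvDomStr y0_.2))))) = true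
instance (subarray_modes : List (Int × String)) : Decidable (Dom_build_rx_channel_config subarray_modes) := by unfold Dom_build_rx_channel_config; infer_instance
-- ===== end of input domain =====

-- B drops A's sort and its enumerate-built channel->position table: it walks the four
-- fixed ADC channels in increasing order via the inverse map and reads each data index
-- off as the channel's position in that list.

def SUBARRAY_TO_ADC : PySem.Dict Int Int := PySem.Dict.ofList [(1, 3), (2, 1), (3, 0), (4, 2)]

-- ===== PORT A =====
-- SUBARRAY_TO_ADC[sa] is ported as `getD … 0`; the default is unreachable under
-- Pre_build_rx_channel_config (Python raises KeyError exactly there).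
def build_rx_channel_config (subarray_modes : List (Int × String)) : List Int × (List (Int × Int)) :=
  let rx_adc_channels : List Int :=
    PySem.List.sorted
      ((subarray_modes.filter (fun p => PySem.Str.lower p.2 == "rx")).map
        (fun p => SUBARRAY_TO_ADC.getD p.1 0))
      (fun x => x) false
  let adc_to_position : PySem.Dict Int Int :=
    (PySem.List.enumerate rx_adc_channels).foldl (fun d q => d.insert q.2 q.1) PySem.Dict.empty
  let subarray_to_data_index : PySem.Dict Int Int :=
    (subarray_modes.filter (fun p => PySem.Str.lower p.2 == "rx")).foldl
      (fun d p => d.insert p.1 (adc_to_position.getD (SUBARRAY_TO_ADC.getD p.1 0) 0))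
      PySem.Dict.empty
  (rx_adc_channels, subarray_to_data_index.items)

-- ===== PORT B =====
def ADC_TO_SUBARRAY : PySem.Dict Int Int := PySem.Dict.ofList [(3, 1), (1, 2), (0, 3), (2, 4)]

-- is_rx(subarray_modes.get(k)): dict.get on the association list = first match (exact
-- per the type convention); None (key absent) is not a str, so is_rx is false there.
def pv_is_rx_get (subarray_modes : List (Int × String)) (k : Int) : Bool :=
  match subarray_modes.find? (fun p => p.1 == k) with
  | none => false
  | some p => PySem.Str.lower p.2 == "rx"

-- rx_adc_channels.index(ch) ported as `(index? …).getD 0`; the default is unreachable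
-- under Pre_build_rx_channel_config (Python raises ValueError exactly there).
def build_rx_channel_config_alt (subarray_modes : List (Int × String)) : List Int × (List (Int × Int)) :=
  let rx_adc_channels : List Int :=
    (PySem.List.pyRange 0 4 1).filter
      (fun ch => pv_is_rx_get subarray_modes (ADC_TO_SUBARRAY.getD ch 0))
  let subarray_to_data_index : PySem.Dict Int Int :=
    (subarray_modes.filter (fun p => PySem.Str.lower p.2 == "rx")).foldl
      (fun d p => d.insert p.1
        (((PySem.List.index? rx_adc_channels (SUBARRAY_TO_ADC.getD p.1 0)).getD 0 : Nat) : Int))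
      PySem.Dict.empty
  (rx_adc_channels, subarray_to_data_index.items)

-- ===== PRECONDITION & SPEC =====
-- Pre_ excludes (i) association lists with duplicate keys, which cannot arise from a
-- Python dict argument, and (ii) inputs with an rx-mode subarray outside SUBARRAY_TO_ADC,
-- on which A (and B) raise KeyError.
def Pre_build_rx_channel_config (subarray_modes : List (Int × String)) : Prop :=
  (subarray_modes.map (·.1)).Nodup ∧
  ∀ p ∈ subarray_modes, PySem.Str.lower p.2 = "rx" → p.1 ∈ ([1, 2, 3, 4] : List Int)
instance (subarray_modes : List (Int × String)) : Decidable (Pre_build_rx_channel_config subarray_modes) := by unfold Pre_build_rx_channel_config; infer_instance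

def pvWitness_build_rx_channel_config : (List (Int × String)) :=
  [(1, "rx"), (2, "rx"), (3, "tx"), (4, "rx")]

def Spec_build_rx_channel_config (subarray_modes : List (Int × String)) (out : List Int × (List (Int × Int))) : Prop := out = build_rx_channel_config_alt subarray_modes
instance (subarray_modes : List (Int × String)) (out : List Int × (List (Int × Int))) : Decidable (Spec_build_rx_channel_config subarray_modes out) := by unfold Spec_build_rx_channel_config; infer_instance

-- ===== CLAIM (what is proved, stated in full; the proofs are below) =====
def Claim_equal_build_rx_channel_config : Prop := ∀ (subarray_modes : List (Int × String)), Dom_build_rx_channel_config subarray_modes → Pre_build_rx_channel_config subarray_modes → Spec_build_rx_channel_config subarray_modes (build_rx_channel_config subarray_modes)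

-- ===== LEMMAS AND PROOFS =====

-- In the table built from `enumerate L` (channel ↦ position), a lookup of ch ∈ L with
-- L nodup returns the index of ch in L (offset by the start s); elsewhere the
-- accumulator is untouched.
theorem pv_table_getD (L : List Int) (s : Int) (d : PySem.Dict Int Int) (ch : Int)
    (hnd : L.Nodup) :
    ((PySem.List.enumerate L s).foldl (fun d q => d.insert q.2 q.1) d).getD ch 0 =
      if ch ∈ L then s + (L.idxOf ch : Int) else d.getD ch 0 := by
  induction L generalizing s d with
  | nil => simp [PySem.List.enumerate]
  | cons x t ih =>
    rw [PySem.List.enumerate_cons]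
    simp only [List.foldl_cons]
    rcases List.nodup_cons.mp hnd with ⟨hx, hnt⟩
    rw [ih _ _ hnt]
    by_cases hmem : ch ∈ t
    · have hne : ch ≠ x := fun h => hx (h ▸ hmem)
      have hxne : (x == ch) = false := beq_eq_false_iff_ne.mpr (fun h => hne h.symm)
      simp only [if_pos hmem, if_pos (List.mem_cons_of_mem _ hmem), List.idxOf_cons, hxne,
        cond_false]
      push_cast
      ring
    · by_cases hx' : ch = x
      · subst hx'
        simp [hmem]
      · simp only [if_neg hmem, if_neg (by simp [hx', hmem] : ¬ ch ∈ x :: t)]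
        rw [PySem.Dict.getD_insert]
        simp [hx']

-- With nodup keys, the first pair found for p's key is p itself.
theorem pv_find?_self (sm : List (Int × String)) (p : Int × String)
    (hnd : (sm.map (·.1)).Nodup) (hp : p ∈ sm) :
    sm.find? (fun q => q.1 == p.1) = some p := by
  induction sm with
  | nil => cases hp
  | cons x t ih =>
    rw [List.map_cons] at hnd
    rcases List.nodup_cons.mp hnd with ⟨hx, hnt⟩
    rcases List.mem_cons.mp hp with h | h
    · subst h; simp
    · have hne : x.1 ≠ p.1 := fun h' => hx (h' ▸ List.mem_map_of_mem h)
      simp [beq_eq_false_iff_ne.mpr hne, ih hnt h]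

-- index? of a member is `some` of its idxOf.
theorem pv_index?_mem (L : List Int) (ch : Int) (h : ch ∈ L) :
    PySem.List.index? L ch = some (L.idxOf ch) := by
  rw [PySem.List.index?_eq_idxOf?]
  induction L with
  | nil => cases h
  | cons x t ih =>
    by_cases hx : x = ch
    · subst hx; simp [List.idxOf?_cons]
    · have hb : (x == ch) = false := beq_eq_false_iff_ne.mpr hx
      rcases List.mem_cons.mp h with h' | h'
      · exact absurd h'.symm hx
      · simp [List.idxOf?_cons, List.idxOf_cons, hb, ih h']

-- B's channel list is exactly A's sorted channel list (under Pre_).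
theorem pv_lists_eq (sm : List (Int × String))
    (hnd : (sm.map (·.1)).Nodup)
    (hkeys : ∀ p ∈ sm, PySem.Str.lower p.2 = "rx" → p.1 ∈ ([1, 2, 3, 4] : List Int)) :
    PySem.List.sorted
      ((sm.filter (fun p => PySem.Str.lower p.2 == "rx")).map
        (fun p => SUBARRAY_TO_ADC.getD p.1 0)) (fun x => x) false =
    (PySem.List.pyRange 0 4 1).filter
      (fun ch => pv_is_rx_get sm (ADC_TO_SUBARRAY.getD ch 0)) := by
  have hkeys' : ∀ p ∈ sm.filter (fun p => PySem.Str.lower p.2 == "rx"),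
      p.1 ∈ ([1, 2, 3, 4] : List Int) := by
    intro p hp
    rcases List.mem_filter.mp hp with ⟨hps, hpf⟩
    exact hkeys p hps (by simpa using hpf)
  -- membership in B's list ↔ membership in A's channel multiset
  have hmemiff : ∀ ch : Int,
      (ch ∈ (PySem.List.pyRange 0 4 1).filter
        (fun ch => pv_is_rx_get sm (ADC_TO_SUBARRAY.getD ch 0))) ↔
      ch ∈ (sm.filter (fun p => PySem.Str.lower p.2 == "rx")).map
        (fun p => SUBARRAY_TO_ADC.getD p.1 0) := by
    intro ch
    constructor
    · intro h
      rcases List.mem_filter.mp h with ⟨hr, hc⟩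
      unfold pv_is_rx_get at hc
      rcases hfind : sm.find? (fun p => p.1 == ADC_TO_SUBARRAY.getD ch 0) with _ | p
      · rw [hfind] at hc; cases hc
      · rw [hfind] at hc
        have hpmem : p ∈ sm := List.mem_of_find?_eq_some hfind
        have hpk : p.1 = ADC_TO_SUBARRAY.getD ch 0 := by
          have := List.find?_some hfind; simpa using this
        have hrx : (PySem.Str.lower p.2 == "rx") = true := hc
        refine List.mem_map.mpr ⟨p, List.mem_filter.mpr ⟨hpmem, hrx⟩, ?_⟩
        rw [hpk]
        have hch : ch = 0 ∨ ch = 1 ∨ ch = 2 ∨ ch = 3 := by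
          have heq : PySem.List.pyRange 0 4 1 = ([0, 1, 2, 3] : List Int) := by decide
          rw [heq] at hr
          simpa using hr
        rcases hch with h | h | h | h <;> rw [h] <;> decide
    · intro h
      rcases List.mem_map.mp h with ⟨p, hpF, hpc⟩
      have hk : p.1 ∈ ([1, 2, 3, 4] : List Int) := hkeys' p hpF
      rcases List.mem_filter.mp hpF with ⟨hpsm, hprx⟩
      have hfind := pv_find?_self sm p hnd hpsm
      have hk' : p.1 = 1 ∨ p.1 = 2 ∨ p.1 = 3 ∨ p.1 = 4 := by simpa using hk
      refine List.mem_filter.mpr ⟨?_, ?_⟩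
      · subst hpc
        rcases hk' with h | h | h | h <;> rw [h] <;> decide
      · unfold pv_is_rx_get
        have hinv : ADC_TO_SUBARRAY.getD ch 0 = p.1 := by
          subst hpc
          rcases hk' with h | h | h | h <;> rw [h] <;> decide
        rw [hinv, hfind]
        exact hprx
  -- both sides nodup
  have hBnd : ((PySem.List.pyRange 0 4 1).filter
      (fun ch => pv_is_rx_get sm (ADC_TO_SUBARRAY.getD ch 0))).Nodup :=
    (PySem.List.nodup_pyRange_one 0 4).filter _
  have hkeysnd : ((sm.filter (fun p => PySem.Str.lower p.2 == "rx")).map (·.1)).Nodup :=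
    hnd.sublist (List.Sublist.map (fun x : Int × String => x.1) List.filter_sublist)
  have hinj : ∀ x ∈ ([1, 2, 3, 4] : List Int), ∀ y ∈ ([1, 2, 3, 4] : List Int),
      SUBARRAY_TO_ADC.getD x 0 = SUBARRAY_TO_ADC.getD y 0 → x = y := by decide
  have hMnd : ((sm.filter (fun p => PySem.Str.lower p.2 == "rx")).map
      (fun p => SUBARRAY_TO_ADC.getD p.1 0)).Nodup := by
    have heq : (sm.filter (fun p => PySem.Str.lower p.2 == "rx")).map
        (fun p => SUBARRAY_TO_ADC.getD p.1 0) =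
        ((sm.filter (fun p => PySem.Str.lower p.2 == "rx")).map (·.1)).map
          (fun k => SUBARRAY_TO_ADC.getD k 0) := by rw [List.map_map]; rfl
    rw [heq]
    refine hkeysnd.map_on ?_
    intro x hx y hy hxy
    rcases List.mem_map.mp hx with ⟨p, hp, rfl⟩
    rcases List.mem_map.mp hy with ⟨q, hq, rfl⟩
    exact hinj _ (hkeys' p hp) _ (hkeys' q hq) hxy
  have hperm : ((PySem.List.pyRange 0 4 1).filter
      (fun ch => pv_is_rx_get sm (ADC_TO_SUBARRAY.getD ch 0))).Perm
      ((sm.filter (fun p => PySem.Str.lower p.2 == "rx")).map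
        (fun p => SUBARRAY_TO_ADC.getD p.1 0)) :=
    (List.perm_ext_iff_of_nodup hBnd hMnd).mpr hmemiff
  have hpair : ((PySem.List.pyRange 0 4 1).filter
      (fun ch => pv_is_rx_get sm (ADC_TO_SUBARRAY.getD ch 0))).Pairwise (· < ·) :=
    (PySem.List.pairwise_lt_pyRange_one 0 4).filter _
  exact PySem.List.sorted_eq_of_perm_of_pairwise_lt _ _ _ hperm hpair

-- ===== VERDICT (by name: the statement is the Claim_ definition above) =====
theorem build_rx_channel_config_spec : Claim_equal_build_rx_channel_config := by
  intro sm _hdom hpre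
  rcases hpre with ⟨hnd, hkeys⟩
  unfold Spec_build_rx_channel_config build_rx_channel_config build_rx_channel_config_alt
  have hL := pv_lists_eq sm hnd hkeys
  rw [← hL]
  have hkeys' : ∀ p ∈ sm.filter (fun p => PySem.Str.lower p.2 == "rx"),
      p.1 ∈ ([1, 2, 3, 4] : List Int) := by
    intro p hp
    rcases List.mem_filter.mp hp with ⟨hps, hpf⟩
    exact hkeys p hps (by simpa using hpf)
  have hkeysnd : ((sm.filter (fun p => PySem.Str.lower p.2 == "rx")).map (·.1)).Nodup :=
    hnd.sublist (List.Sublist.map (fun x : Int × String => x.1) List.filter_sublist)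
  have hinj : ∀ x ∈ ([1, 2, 3, 4] : List Int), ∀ y ∈ ([1, 2, 3, 4] : List Int),
      SUBARRAY_TO_ADC.getD x 0 = SUBARRAY_TO_ADC.getD y 0 → x = y := by decide
  have hMnd : ((sm.filter (fun p => PySem.Str.lower p.2 == "rx")).map
      (fun p => SUBARRAY_TO_ADC.getD p.1 0)).Nodup := by
    have heq : (sm.filter (fun p => PySem.Str.lower p.2 == "rx")).map
        (fun p => SUBARRAY_TO_ADC.getD p.1 0) =
        ((sm.filter (fun p => PySem.Str.lower p.2 == "rx")).map (·.1)).map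
          (fun k => SUBARRAY_TO_ADC.getD k 0) := by rw [List.map_map]; rfl
    rw [heq]
    refine hkeysnd.map_on ?_
    intro x hx y hy hxy
    rcases List.mem_map.mp hx with ⟨p, hp, rfl⟩
    rcases List.mem_map.mp hy with ⟨q, hq, rfl⟩
    exact hinj _ (hkeys' p hp) _ (hkeys' q hq) hxy
  have hLnd : (PySem.List.sorted ((sm.filter (fun p => PySem.Str.lower p.2 == "rx")).map
      (fun p => SUBARRAY_TO_ADC.getD p.1 0)) (fun x => x) false).Nodup :=
    (PySem.List.sorted_perm _ _ _).nodup_iff.mpr hMnd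
  refine congrArg _ ?_
  refine congrArg _ ?_
  refine PySem.List.foldl_congr_mem _ _ _ _ ?_
  intro acc p hp
  congr 1
  have hchmem : SUBARRAY_TO_ADC.getD p.1 0 ∈ PySem.List.sorted
      ((sm.filter (fun p => PySem.Str.lower p.2 == "rx")).map
        (fun p => SUBARRAY_TO_ADC.getD p.1 0)) (fun x => x) false :=
    (PySem.List.mem_sorted ..).mpr (List.mem_map_of_mem hp)
  rw [pv_table_getD _ _ _ _ hLnd, if_pos hchmem, pv_index?_mem _ _ hchmem]
  simp
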